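-- pv_equiv track=rewrite | github.com/zirachw/Tubes3_IngfoLoker | src/bm.py | generate_last_occurence
-- ===== SOURCE A (Python) =====
-- def generate_last_occurence(pattern: str, keys):
--     last_occurence = {}
--     for key in keys:
--         last_occurence[key] = -1
--
--     for i in range(len(pattern)):
--         if (pattern[i] in keys):
--             last_occurence[pattern[i]] = i
--
--     return last_occurence
-- ===== SOURCE B (Python) =====
-- def generate_last_occurence(pattern: str, keys):
--     # Per-key closed form: each key's value is the last pattern index equal to it,
--     # found by one reverse scan of the pattern per key (no shared mutable table).
--     def last_index(key):
--         for i in range(len(pattern) - 1, -1, -1):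
--             if pattern[i] == key:
--                 return i
--         return -1
--     return {key: last_index(key) for key in keys}
-- ===== Notes on version B (the rewrite author's own statement) =====
-- stated objective: alternative
-- what changed: B replaces A's two-phase mutable table (init to -1, then forward scan of the pattern overwriting entries) by a per-key closed form: a dict comprehension that computes each key's last occurrence with its own reverse scan of the pattern, returning at the first hit.
import Mathlib
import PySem

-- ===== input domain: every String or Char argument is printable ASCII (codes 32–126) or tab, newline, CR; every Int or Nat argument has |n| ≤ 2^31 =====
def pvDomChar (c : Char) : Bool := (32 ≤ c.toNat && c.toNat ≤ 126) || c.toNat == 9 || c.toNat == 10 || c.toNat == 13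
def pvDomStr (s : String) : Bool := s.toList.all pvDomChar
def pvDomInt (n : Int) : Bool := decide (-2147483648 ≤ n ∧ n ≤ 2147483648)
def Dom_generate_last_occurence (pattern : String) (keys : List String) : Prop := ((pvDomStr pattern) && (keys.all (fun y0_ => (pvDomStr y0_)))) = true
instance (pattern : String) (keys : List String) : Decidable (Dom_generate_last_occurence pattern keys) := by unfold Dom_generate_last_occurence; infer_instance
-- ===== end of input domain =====

-- B replaces A's two-phase mutable table (init to -1, then forward overwrite scan of the
-- pattern with a list-membership test) by a per-key closed form: a dict comprehension that
-- finds each key's last occurrence with its own reverse scan of the pattern.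


-- ===== PORT A =====
def generate_last_occurence (pattern : String) (keys : List String) : List (String × Int) :=
  let last0 : PySem.Dict String Int :=
    keys.foldl (fun d key => d.insert key (-1)) PySem.Dict.empty
  let cs := pattern.toList
  let last :=
    (PySem.List.pyRange 0 (cs.length : Int) 1).foldl
      (fun d i =>
        let c := String.ofList [PySem.List.pyGetD cs i ' ']
        if keys.contains c then d.insert c i else d)
      last0
  last.items
-- ===== PORT B =====
-- helper: B's inner 'last_index' — reverse countdown range, return first index whose char equals key, else -1
def lastIndexB (cs : List Char) (key : String) : Int :=
  match (PySem.List.pyRange ((cs.length : Int) - 1) (-1) (-1)).find?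
      (fun i => String.ofList [PySem.List.pyGetD cs i ' '] == key) with
  | some i => i
  | none => -1

def generate_last_occurence_alt (pattern : String) (keys : List String) : List (String × Int) :=
  let cs := pattern.toList
  (keys.foldl (fun d key => d.insert key (lastIndexB cs key)) PySem.Dict.empty).items

-- ===== PRECONDITION & SPEC =====
def Spec_generate_last_occurence (pattern : String) (keys : List String) (out : List (String × Int)) : Prop := out = generate_last_occurence_alt pattern keys
instance (pattern : String) (keys : List String) (out : List (String × Int)) : Decidable (Spec_generate_last_occurence pattern keys out) := by unfold Spec_generate_last_occurence; infer_instance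

-- ===== CLAIM =====
def Claim_equal_generate_last_occurence : Prop := ∀ (pattern : String) (keys : List String), Dom_generate_last_occurence pattern keys → Spec_generate_last_occurence pattern keys (generate_last_occurence pattern keys)

-- ===== LEMMAS AND PROOFS =====

def keyAt (cs : List Char) (a : Nat) : String := String.ofList [cs.getD a ' ']
def stepA (keys : List String) (cs : List Char) (d : PySem.Dict String Int) (a : Nat) : PySem.Dict String Int :=
  if keys.contains (keyAt cs a) then d.insert (keyAt cs a) (a : Int) else d
def predK (keys : List String) (cs : List Char) (k : String) (a : Nat) : Bool :=
  keys.contains (keyAt cs a) && (keyAt cs a == k)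
def initD (keys : List String) : PySem.Dict String Int :=
  keys.foldl (fun d key => d.insert key (-1)) PySem.Dict.empty
def dictB (cs : List Char) (keys : List String) : PySem.Dict String Int :=
  keys.foldl (fun d key => d.insert key (lastIndexB cs key)) PySem.Dict.empty

theorem bridgeA (pattern : String) (keys : List String) :
    generate_last_occurence pattern keys
      = ((List.range pattern.toList.length).foldl (stepA keys pattern.toList) (initD keys)).items := by
  simp only [generate_last_occurence, initD, PySem.List.pyRange_zero_nat,
    List.foldl_map, PySem.List.pyGetD_natCast]
  rfl

theorem bridgeB (pattern : String) (keys : List String) :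
    generate_last_occurence_alt pattern keys = (dictB pattern.toList keys).items := rfl

theorem initD_get?_aux (keys : List String) :
    ∀ (d : PySem.Dict String Int) (k : String),
      (keys.foldl (fun d key => d.insert key (-1)) d).get? k
        = if k ∈ keys then some (-1) else d.get? k := by
  induction keys with
  | nil => intro d k; simp
  | cons a ks ih =>
      intro d k
      simp only [List.foldl_cons, ih, List.mem_cons]
      by_cases h1 : k ∈ ks
      · simp [h1]
      · by_cases h2 : k = a
        · simp [h2, PySem.Dict.get?_insert_self]
        · simp [h1, h2, PySem.Dict.get?_insert_of_ne _ _ h2]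

theorem initD_get? (keys : List String) (k : String) :
    (initD keys).get? k = if k ∈ keys then some (-1) else none := by
  simp [initD, initD_get?_aux, PySem.Dict.get?_empty]

theorem initD_contains (keys : List String) (k : String) :
    (initD keys).contains k = keys.contains k := by
  rw [PySem.Dict.contains_eq_isSome_get?, initD_get?]
  by_cases h : k ∈ keys <;> simp [h]

theorem initD_nodup (keys : List String) : (initD keys).keys.Nodup :=
  PySem.Dict.nodup_keys_foldl_insert keys (fun _ _ => (-1 : Int)) PySem.Dict.empty (by simp)

theorem dictB_get?_aux (cs : List Char) (keys : List String) :
    ∀ (d : PySem.Dict String Int) (k : String),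
      (keys.foldl (fun d key => d.insert key (lastIndexB cs key)) d).get? k
        = if k ∈ keys then some (lastIndexB cs k) else d.get? k := by
  induction keys with
  | nil => intro d k; simp
  | cons a ks ih =>
      intro d k
      simp only [List.foldl_cons, ih, List.mem_cons]
      by_cases h1 : k ∈ ks
      · simp [h1]
      · by_cases h2 : k = a
        · simp [h2, PySem.Dict.get?_insert_self]
        · simp [h1, h2, PySem.Dict.get?_insert_of_ne _ _ h2]

theorem dictB_get? (cs : List Char) (keys : List String) (k : String) :
    (dictB cs keys).get? k = if k ∈ keys then some (lastIndexB cs k) else none := by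
  simp [dictB, dictB_get?_aux, PySem.Dict.get?_empty]

theorem dictB_nodup (cs : List Char) (keys : List String) : (dictB cs keys).keys.Nodup :=
  PySem.Dict.nodup_keys_foldl_insert keys (fun _ key => lastIndexB cs key) PySem.Dict.empty (by simp)

theorem dictB_keys (cs : List Char) (keys : List String) :
    (dictB cs keys).keys = (initD keys).keys := by
  rw [dictB, initD, PySem.Dict.keys_foldl_insert, PySem.Dict.keys_foldl_insert]

theorem keysA_eq (keys : List String) (cs : List Char) :
    ∀ (l : List Nat) (d : PySem.Dict String Int),
      (∀ k, k ∈ keys → k ∈ d.keys) → (l.foldl (stepA keys cs) d).keys = d.keys := by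
  intro l
  induction l with
  | nil => intro d _; simp
  | cons a l ih =>
      intro d hd
      simp only [List.foldl_cons]
      by_cases h : keys.contains (keyAt cs a)
      · have hmem : keyAt cs a ∈ d.keys := hd _ (by simpa using h)
        have hcont : d.contains (keyAt cs a) = true :=
          (PySem.Dict.contains_iff_mem_keys _ _).2 hmem
        have hk : (d.insert (keyAt cs a) ((a : Nat) : Int)).keys = d.keys :=
          PySem.Dict.keys_insert_of_contains _ _ hcont
        rw [stepA, if_pos h, ih _ (fun k hk' => by rw [hk]; exact hd k hk'), hk]
      · rw [stepA, if_neg h, ih _ hd]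

theorem getA (keys : List String) (cs : List Char) :
    ∀ (l : List Nat) (d : PySem.Dict String Int) (k : String),
      (l.foldl (stepA keys cs) d).get? k
        = Option.or ((l.reverse.find? (predK keys cs k)).map (fun a => (a : Int))) (d.get? k) := by
  intro l
  induction l with
  | nil => intro d k; simp
  | cons a l ih =>
      intro d k
      simp only [List.foldl_cons, List.reverse_cons, List.find?_append, ih]
      by_cases hc : keys.contains (keyAt cs a)
      · by_cases hk : keyAt cs a = k
        · have hp : predK keys cs k a = true := by rw [predK, hc, hk]; simp
          have : (stepA keys cs d a).get? k = some ((a : Nat) : Int) := by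
            rw [stepA, if_pos hc, ← hk, PySem.Dict.get?_insert_self]
          rw [this]
          cases h : l.reverse.find? (predK keys cs k) <;>
            simp [hp, Option.or]
        · have hp : predK keys cs k a = false := by simp [predK, hk]
          have : (stepA keys cs d a).get? k = d.get? k := by
            rw [stepA, if_pos hc, PySem.Dict.get?_insert_of_ne _ _ (fun h => hk h.symm)]
          rw [this]
          cases h : l.reverse.find? (predK keys cs k) <;> simp [hp, Option.or]
      · have hcb : keys.contains (keyAt cs a) = false := by simpa using hc
        have hp : predK keys cs k a = false := by rw [predK, hcb]; simp
        have : (stepA keys cs d a).get? k = d.get? k := by rw [stepA, if_neg hc]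
        rw [this]
        cases h : l.reverse.find? (predK keys cs k) <;> simp [hp, Option.or]

-- B's last_index is the find? over the reversed index range with the bare equality predicate
theorem lastIndexB_eq (cs : List Char) (k : String) :
    lastIndexB cs k
      = match ((List.range cs.length).reverse.find? (fun a => keyAt cs a == k)).map
            (fun a => (a : Int)) with
        | some i => i
        | none => -1 := by
  rw [lastIndexB]
  have h1 : PySem.List.pyRange ((cs.length : Int) - 1) (-1) (-1)
      = (PySem.List.pyRange 0 (cs.length : Int) 1).reverse := by
    have := PySem.List.pyRange_neg_one_eq_reverse ((cs.length : Int) - 1) (-1)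
    simpa using this
  rw [h1, PySem.List.pyRange_zero_natCast, ← List.map_reverse, List.find?_map]
  have h2 : ((fun i => String.ofList [PySem.List.pyGetD cs i ' '] == k) ∘ fun a : Nat => (a : Int))
      = fun a : Nat => keyAt cs a == k := by
    funext a; simp [Function.comp, PySem.List.pyGetD_natCast, keyAt]
  rw [h2]
  cases ((List.range cs.length).reverse.find? (fun a => keyAt cs a == k)) <;> rfl

-- when k ∈ keys the guarded predicate predK reduces to the bare equality
theorem predK_of_mem (keys : List String) (cs : List Char) (k : String) (hk : k ∈ keys) :
    predK keys cs k = fun a => keyAt cs a == k := by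
  funext a
  rw [predK]
  by_cases h : keyAt cs a = k
  · subst h; simp [hk]
  · simp [h]

theorem final_eq (pattern : String) (keys : List String) :
    generate_last_occurence pattern keys = generate_last_occurence_alt pattern keys := by
  rw [bridgeA, bridgeB]
  have hmem : ∀ k, k ∈ keys → k ∈ (initD keys).keys := by
    intro k hk
    exact (PySem.Dict.contains_iff_mem_keys _ _).1 (by rw [initD_contains]; simpa using hk)
  have hkA := keysA_eq keys pattern.toList (List.range pattern.toList.length) (initD keys) hmem
  have hnodA : ((List.range pattern.toList.length).foldl (stepA keys pattern.toList) (initD keys)).keys.Nodup := by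
    rw [hkA]; exact initD_nodup keys
  rw [PySem.Dict.items_eq_map_keys _ hnodA (-1),
    PySem.Dict.items_eq_map_keys _ (dictB_nodup pattern.toList keys) (-1), hkA,
    dictB_keys pattern.toList keys]
  apply List.map_congr_left
  intro k hkmem
  have hkkeys : k ∈ keys := by
    have := (PySem.Dict.contains_iff_mem_keys (initD keys) k).2 hkmem
    rw [initD_contains] at this; simpa using this
  rw [PySem.Dict.getD_eq_get?_getD, PySem.Dict.getD_eq_get?_getD,
    getA, dictB_get?, if_pos hkkeys, initD_get?, if_pos hkkeys,
    lastIndexB_eq, predK_of_mem keys pattern.toList k hkkeys]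
  cases ((List.range pattern.toList.length).reverse.find? (fun a => keyAt pattern.toList a == k)) <;>
    simp [Option.or]

-- ===== VERDICT =====
theorem generate_last_occurence_spec : Claim_equal_generate_last_occurence := by
  intro pattern keys _
  exact final_eq pattern keys
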